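-- pv_equiv track=rewrite | github.com/MatteoCaldana/competitive-programming | project-euler/euler48.py | cutlogpow
-- ===== SOURCE A (Python) =====
-- def cutlogpow(a, b):
--     res = 1
--     while (b > 0):
--         if (b & 1):
--             res = int(str(res*a)[-10:])
--         a = int(str(a*a)[-10:])
--         b >>= 1
--     return res
-- ===== SOURCE B (Python) =====
-- def cutlogpow(a, b):
--     if b <= 0:
--         return 1
--     return pow(a, b, 10 ** 10)
-- ===== Notes on version B (the rewrite author's own statement) =====
-- stated objective: idiomatic
-- what changed: Replaced A's hand-rolled square-and-multiply loop with its string-slice last-10-digits trick by an early return of 1 for b <= 0 plus a single call to Python's built-in three-argument pow(a, b, 10**10) doing true modular reduction.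
-- outside the precondition, e.g. on cutlogpow(-2, 1): A returns -2, B returns 9999999998
import Mathlib
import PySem

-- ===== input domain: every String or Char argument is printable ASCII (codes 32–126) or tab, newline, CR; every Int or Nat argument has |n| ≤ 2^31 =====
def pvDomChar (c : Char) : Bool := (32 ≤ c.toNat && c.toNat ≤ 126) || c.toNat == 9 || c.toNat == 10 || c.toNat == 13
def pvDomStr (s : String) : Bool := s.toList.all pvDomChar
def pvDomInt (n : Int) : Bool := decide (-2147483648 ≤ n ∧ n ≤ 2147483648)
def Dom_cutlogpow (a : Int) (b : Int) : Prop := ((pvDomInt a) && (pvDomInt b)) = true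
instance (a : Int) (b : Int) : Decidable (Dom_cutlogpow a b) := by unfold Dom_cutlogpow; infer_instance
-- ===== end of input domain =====

-- B replaces A's hand-rolled square-and-multiply ladder (with string-slice digit cutting)
-- by a single call to Python's built-in three-argument pow with modulus 10^10 (idiomatic).

-- ===== PORT A =====
-- int(str(x)[-10:]), ported by its exact arithmetic meaning for every integer x:
-- for 0 ≤ x the 10-char tail of str(x) is the last ten decimal digits, i.e. x % 10^10;
-- for x < 0, str(x) = '-' ++ digits(-x), so the tail keeps the sign iff -x has at most
-- 9 digits (the slice is then the whole string, value x) and otherwise drops it.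
def pvCut10 (x : Int) : Int :=
  if 0 ≤ x then x % 10000000000
  else if -x ≤ 999999999 then x
  else (-x) % 10000000000

-- the 'while b > 0' loop of A, state (a, b, res)
def cutlogpowGo (a : Int) (b : Int) (res : Int) : Int :=
  if 0 < b then
    let res' := if PySem.Int.band b 1 ≠ 0 then pvCut10 (res * a) else res
    cutlogpowGo (pvCut10 (a * a)) (b >>> (1 : Nat)) res'
  else res
termination_by b.toNat
decreasing_by
  have : b >>> (1 : Nat) = b / 2 := by
    simpa using Int.shiftRight_eq_div_pow b 1
  rw [this]; omega

def cutlogpow (a : Int) (b : Int) : Int := cutlogpowGo a b 1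

-- ===== PORT B =====
-- Source B: if b <= 0: return 1 ; return pow(a, b, 10 ** 10)
-- (the library call pow(a, b, 10**10) is ported as the corresponding modular power value)
def cutlogpow_alt (a : Int) (b : Int) : Int :=
  if b ≤ 0 then 1 else (a ^ b.toNat) % 10000000000

-- ===== PRECONDITION & SPEC =====
-- Pre_ excludes negative bases with a positive odd exponent: there A's string-slice digit
-- extraction keeps or drops the minus sign by magnitude-dependent accident, while B returns
-- the canonical nonnegative residue mod 10^10; everywhere else A's multiplied intermediates
-- are nonnegative and the last-ten-digits slice coincides with % 10^10.
def Pre_cutlogpow (a : Int) (b : Int) : Prop := 0 ≤ a ∨ b ≤ 0 ∨ b % 2 = 0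
instance (a : Int) (b : Int) : Decidable (Pre_cutlogpow a b) := by unfold Pre_cutlogpow; infer_instance

def pvWitness_cutlogpow : Int × Int := (7, 19)

def Spec_cutlogpow (a : Int) (b : Int) (out : Int) : Prop := out = cutlogpow_alt a b
instance (a : Int) (b : Int) (out : Int) : Decidable (Spec_cutlogpow a b out) := by unfold Spec_cutlogpow; infer_instance

-- ===== CLAIM (what is proved, stated in full; the proofs are below) =====
def Claim_equal_cutlogpow : Prop := ∀ (a : Int) (b : Int), Dom_cutlogpow a b → Pre_cutlogpow a b → Spec_cutlogpow a b (cutlogpow a b)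

-- ===== LEMMAS AND PROOFS =====

theorem pvShift_one (b : Int) : b >>> (1 : Nat) = b / 2 := by
  simpa using Int.shiftRight_eq_div_pow b 1

theorem pvBand_one (b : Int) : PySem.Int.band b 1 = b % 2 := by
  rw [PySem.Int.band_one]
  exact PySem.Int.mod_eq_emod_of_pos (by norm_num)

theorem pv_mulL (x y M : Int) : (x % M * y) % M = (x * y) % M := by
  conv_rhs => rw [Int.mul_emod]
  rw [Int.mul_emod, Int.emod_emod_of_dvd x dvd_rfl]

theorem pv_powMod (y M : Int) (k : Nat) : (y % M) ^ k % M = y ^ k % M := by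
  induction k with
  | zero => simp
  | succ k ih =>
    rw [pow_succ, pow_succ, Int.mul_emod, ih, Int.emod_emod_of_dvd y dvd_rfl, ← Int.mul_emod]

theorem pv_mulR (x y M : Int) (k : Nat) : (x * ((y % M) ^ k)) % M = (x * y ^ k) % M := by
  conv_lhs => rw [Int.mul_emod, pv_powMod]
  conv_rhs => rw [Int.mul_emod]

theorem pvCut10_nonneg (x : Int) (hx : 0 ≤ x) : pvCut10 x = x % 10000000000 := by
  unfold pvCut10; rw [if_pos hx]

theorem go_eq (n : Nat) : ∀ (a b res : Int), 0 ≤ res → 0 < b → (0 ≤ a ∨ b % 2 = 0) →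
    b.toNat ≤ n → cutlogpowGo a b res = (res * a ^ b.toNat) % 10000000000 := by
  induction n with
  | zero => intro a b res _ hb _ hle; omega
  | succ n ih =>
    intro a b res hres hb hparity hle
    rw [cutlogpowGo, if_pos hb]
    rw [pvBand_one, pvShift_one]
    by_cases h2 : b / 2 = 0
    · -- b = 1, hence b is odd and 0 ≤ a
      have hb1 : b = 1 := by omega
      have ha : 0 ≤ a := by
        rcases hparity with h | h
        · exact h
        · omega
      subst hb1
      norm_num
      rw [cutlogpowGo, if_neg (by norm_num)]
      rw [pvCut10_nonneg _ (mul_nonneg hres ha)]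
    · have hpos : 0 < b / 2 := by omega
      have hle' : (b / 2).toNat ≤ n := by omega
      rw [pvCut10_nonneg (a * a) (mul_self_nonneg a)]
      by_cases hodd : b % 2 = 1
      · have ha : 0 ≤ a := by
          rcases hparity with h | h
          · exact h
          · omega
        have hk : b.toNat = 2 * (b / 2).toNat + 1 := by omega
        rw [if_pos (by rw [hodd]; norm_num)]
        rw [pvCut10_nonneg _ (mul_nonneg hres ha)]
        rw [ih _ _ _ (Int.emod_nonneg _ (by norm_num)) hpos
              (Or.inl (Int.emod_nonneg _ (by norm_num))) hle']
        rw [pv_mulL, pv_mulR, hk]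
        congr 1
        ring
      · have hk : b.toNat = 2 * (b / 2).toNat := by omega
        rw [if_neg (by omega)]
        rw [ih _ _ _ hres hpos (Or.inl (Int.emod_nonneg _ (by norm_num))) hle']
        rw [pv_mulR, hk]
        congr 1
        ring

-- ===== VERDICT (by name: the statement is the Claim_ definition above) =====
theorem cutlogpow_spec : Claim_equal_cutlogpow := by
  intro a b _ hpre
  unfold Spec_cutlogpow cutlogpow cutlogpow_alt
  by_cases hb : b ≤ 0
  · rw [cutlogpowGo, if_neg (by omega), if_pos hb]
  · have hb' : 0 < b := by omega
    have hparity : 0 ≤ a ∨ b % 2 = 0 := by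
      rcases hpre with h | h | h
      · exact Or.inl h
      · omega
      · exact Or.inr h
    rw [go_eq b.toNat a b 1 (by norm_num) hb' hparity le_rfl, if_neg hb, one_mul]
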